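-- pv_equiv track=rewrite | github.com/raihanmehran/ProcessMining-Course | Week3/minerr.py | dependency_graph_inline
-- ===== SOURCE A (Python) =====
-- def dependency_graph_inline(log):
--     dependency_graph = {}
--
--     for case, events in log.items():
--
--         for i in range(len(events) - 1):
--             task_1 = events[i]['concept:name']
--             task_2 = events[i + 1]['concept:name']
--
--             if task_1 not in dependency_graph:
--                 dependency_graph[task_1] = {}
--
--             if task_2 not in dependency_graph[task_1]:
--                 dependency_graph[task_1][task_2] = 0
--
--             dependency_graph[task_1][task_2] += 1
--     return dependency_graph
-- ===== SOURCE B (Python) =====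
-- def dependency_graph_inline(log):
--     # Pass 1: flat tally of adjacent-task pairs across all cases.
--     counts = {}
--     for events in log.values():
--         for e1, e2 in zip(events, events[1:]):
--             pair = (e1['concept:name'], e2['concept:name'])
--             counts[pair] = counts.get(pair, 0) + 1
--     # Pass 2: reshape the flat table into the nested graph dict.
--     graph = {}
--     for (t1, t2), c in counts.items():
--         graph.setdefault(t1, {})[t2] = c
--     return graph
-- ===== Notes on version B (the rewrite author's own statement) =====
-- stated objective: idiomatic
-- what changed: Replaces A's single incremental nested-dict pass (index loop with membership guards and in-place increments) by a two-pass decomposition: a flat Counter-style tally of adjacent pairs via zip(events, events[1:]), then a separate reshaping pass that builds the nested graph from the flat table.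
import Mathlib
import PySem

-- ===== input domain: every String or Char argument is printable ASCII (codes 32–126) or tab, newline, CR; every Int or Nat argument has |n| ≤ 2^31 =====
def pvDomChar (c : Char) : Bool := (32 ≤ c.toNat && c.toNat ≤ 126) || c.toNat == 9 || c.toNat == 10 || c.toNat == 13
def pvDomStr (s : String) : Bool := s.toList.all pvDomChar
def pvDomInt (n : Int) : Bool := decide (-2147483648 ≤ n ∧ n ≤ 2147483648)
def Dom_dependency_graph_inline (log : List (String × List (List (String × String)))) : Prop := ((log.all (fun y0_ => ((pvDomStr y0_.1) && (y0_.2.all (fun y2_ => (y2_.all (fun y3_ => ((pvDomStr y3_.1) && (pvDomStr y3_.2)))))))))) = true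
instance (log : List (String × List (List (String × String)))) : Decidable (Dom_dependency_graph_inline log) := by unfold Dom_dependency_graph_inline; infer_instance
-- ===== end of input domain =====

-- B replaces A's single incremental nested-dict pass by a flat tally of adjacent pairs followed by a
-- separate reshaping pass (objective: idiomatic; same asymptotic cost).

-- ===== PORT A =====
def dependency_graph_inline (log : List (String × List (List (String × String)))) : List (String × List (String × Int)) :=
  let g : PySem.Dict String (PySem.Dict String Int) :=
    log.foldl (fun g p =>
      (PySem.List.pyRange 0 (PySem.List.len p.2 - 1) 1).foldl (fun g i =>
        let task_1 := (PySem.Dict.ofList (PySem.List.pyGetD p.2 i [])).getD "concept:name" ""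
        let task_2 := (PySem.Dict.ofList (PySem.List.pyGetD p.2 (i + 1) [])).getD "concept:name" ""
        let g := if g.contains task_1 then g else g.insert task_1 PySem.Dict.empty
        let inner := g.getD task_1 PySem.Dict.empty
        let inner := if inner.contains task_2 then inner else inner.insert task_2 0
        g.insert task_1 (inner.insert task_2 (inner.getD task_2 0 + 1))) g) PySem.Dict.empty
  g.items.map (fun q => (q.1, q.2.items))

-- ===== PORT B =====
def dependency_graph_inline_alt (log : List (String × List (List (String × String)))) : List (String × List (String × Int)) :=
  let counts : PySem.Dict (String × String) Int :=
    log.foldl (fun counts p =>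
      (p.2.zip (PySem.List.slice p.2 (some 1) none)).foldl (fun counts e =>
        let pair := ((PySem.Dict.ofList e.1).getD "concept:name" "",
                     (PySem.Dict.ofList e.2).getD "concept:name" "")
        counts.insert pair (counts.getD pair 0 + 1)) counts) PySem.Dict.empty
  let graph : PySem.Dict String (PySem.Dict String Int) :=
    counts.items.foldl (fun graph q =>
      let inner := graph.setdefault q.1.1 PySem.Dict.empty
      inner.insert q.1.1 ((inner.getD q.1.1 PySem.Dict.empty).insert q.1.2 q.2)) PySem.Dict.empty
  graph.items.map (fun q => (q.1, q.2.items))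

-- ===== PRECONDITION & SPEC =====
-- Pre_ excludes exactly the inputs where the Python raises KeyError: some case with at least two
-- events contains an event dict without the key "concept:name".
def Pre_dependency_graph_inline (log : List (String × List (List (String × String)))) : Prop :=
  ∀ p ∈ log, 2 ≤ p.2.length → ∀ ev ∈ p.2, (PySem.Dict.ofList ev).contains "concept:name" = true
instance (log : List (String × List (List (String × String)))) : Decidable (Pre_dependency_graph_inline log) := by unfold Pre_dependency_graph_inline; infer_instance

def pvWitness_dependency_graph_inline : (List (String × List (List (String × String)))) :=
  [("case1", [[("concept:name", "a")], [("concept:name", "b")], [("concept:name", "a")]]),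
   ("case2", [[("concept:name", "a")], [("concept:name", "b")]])]

def Spec_dependency_graph_inline (log : List (String × List (List (String × String)))) (out : List (String × List (String × Int))) : Prop := out = dependency_graph_inline_alt log
instance (log : List (String × List (List (String × String)))) (out : List (String × List (String × Int))) : Decidable (Spec_dependency_graph_inline log out) := by unfold Spec_dependency_graph_inline; infer_instance

-- ===== CLAIM (what is proved, stated in full; the proofs are below) =====
def Claim_equal_dependency_graph_inline : Prop := ∀ (log : List (String × List (List (String × String)))), Dom_dependency_graph_inline log → Pre_dependency_graph_inline log → Spec_dependency_graph_inline log (dependency_graph_inline log)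

-- ===== LEMMAS AND PROOFS =====

-- the event-name lookup both ports perform
def pvLk (ev : List (String × String)) : String := (PySem.Dict.ofList ev).getD "concept:name" ""

-- A's loop body, as a function of the current graph and one adjacent pair
def pvStepA (g : PySem.Dict String (PySem.Dict String Int)) (p : String × String) :
    PySem.Dict String (PySem.Dict String Int) :=
  let g1 := if g.contains p.1 then g else g.insert p.1 PySem.Dict.empty
  let inner := g1.getD p.1 PySem.Dict.empty
  let inner1 := if inner.contains p.2 then inner else inner.insert p.2 0
  g1.insert p.1 (inner1.insert p.2 (inner1.getD p.2 0 + 1))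

-- B's reshaping body: graph.setdefault(t1, {})[t2] = c
def pvStepB (g : PySem.Dict String (PySem.Dict String Int)) (q : (String × String) × Int) :
    PySem.Dict String (PySem.Dict String Int) :=
  let g1 := g.setdefault q.1.1 PySem.Dict.empty
  g1.insert q.1.1 ((g1.getD q.1.1 PySem.Dict.empty).insert q.1.2 q.2)

-- the flat list of adjacent name pairs, in traversal order
def pvPairs (log : List (String × List (List (String × String)))) : List (String × String) :=
  log.flatMap (fun p => (p.2.zip p.2.tail).map (fun e => (pvLk e.1, pvLk e.2)))

def pvCnt (ps : List (String × String)) : PySem.Dict (String × String) Int :=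
  ps.foldl (fun c x => c.insert x (c.getD x 0 + 1)) PySem.Dict.empty

def pvReshape (l : List ((String × String) × Int)) (g0 : PySem.Dict String (PySem.Dict String Int)) :
    PySem.Dict String (PySem.Dict String Int) :=
  l.foldl pvStepB g0

-- normal forms of the two step functions
theorem pvStepB_eq (g : PySem.Dict String (PySem.Dict String Int)) (q : (String × String) × Int) :
    pvStepB g q = g.insert q.1.1 ((g.getD q.1.1 PySem.Dict.empty).insert q.1.2 q.2) := by
  unfold pvStepB
  by_cases h : g.contains q.1.1
  · simp [PySem.Dict.setdefault_of_contains _ _ h]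
  · simp only [Bool.not_eq_true] at h
    simp [PySem.Dict.setdefault_of_not_contains _ _ h, PySem.Dict.getD_insert_self,
      PySem.Dict.getD_of_not_contains _ _ h, PySem.Dict.insert_insert_self]

theorem pvStepA_eq (g : PySem.Dict String (PySem.Dict String Int)) (p : String × String) :
    pvStepA g p = pvStepB g (p, (g.getD p.1 PySem.Dict.empty).getD p.2 0 + 1) := by
  rw [pvStepB_eq]
  unfold pvStepA
  by_cases h : g.contains p.1
  · simp only [h, if_true]
    by_cases h2 : (g.getD p.1 PySem.Dict.empty).contains p.2
    · simp [h2]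
    · simp only [Bool.not_eq_true] at h2
      simp [h2, PySem.Dict.getD_insert_self, PySem.Dict.getD_of_not_contains _ _ h2,
        PySem.Dict.insert_insert_self]
  · simp only [Bool.not_eq_true] at h
    simp [h, PySem.Dict.getD_insert_self, PySem.Dict.getD_of_not_contains _ _ h,
      PySem.Dict.contains_empty, PySem.Dict.getD_empty, PySem.Dict.insert_insert_self]

-- inserting at an existing key commutes with inserting at another key (items-level)
theorem pvInsert_comm {κ ν : Type} [BEq κ] [LawfulBEq κ] (d : PySem.Dict κ ν) (k k' : κ) (v v' : ν)
    (hne : k ≠ k') (hc : d.contains k = true) :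
    (d.insert k' v').insert k v = (d.insert k v).insert k' v' := by
  have hck : (d.insert k' v').contains k = true := by
    simp [PySem.Dict.contains_insert, hc]
  have hck' : (d.insert k v).contains k' = d.contains k' := by
    simp [PySem.Dict.contains_insert, (Ne.symm hne)]
  apply PySem.Dict.ext
  by_cases h' : d.contains k'
  · have hck2 : (d.insert k v).contains k' = true := by rw [hck']; exact h'
    rw [PySem.Dict.items_insert_of_contains _ _ hck,
        PySem.Dict.items_insert_of_contains _ _ h',
        PySem.Dict.items_insert_of_contains _ _ hck2,
        PySem.Dict.items_insert_of_contains _ _ hc]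
    simp only [List.map_map]
    apply List.map_congr_left
    intro p _
    simp only [Function.comp_apply]
    by_cases h1 : p.1 = k' <;> by_cases h2 : p.1 = k <;> simp_all [Ne.symm hne]
  · simp only [Bool.not_eq_true] at h'
    have hck2 : (d.insert k v).contains k' = false := by rw [hck']; exact h'
    rw [PySem.Dict.items_insert_of_contains _ _ hck,
        PySem.Dict.items_insert_of_not_contains _ _ h',
        PySem.Dict.items_insert_of_not_contains _ _ hck2,
        PySem.Dict.items_insert_of_contains _ _ hc]
    simp [List.map_append, Ne.symm hne]

-- pvStepB grows the key sets
theorem pvStepB_contains (g : PySem.Dict String (PySem.Dict String Int)) (x : (String × String) × Int)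
    (t1 : String) (hc : g.contains t1 = true) : (pvStepB g x).contains t1 = true := by
  rw [pvStepB_eq]
  simp [PySem.Dict.contains_insert, hc]

theorem pvStepB_inner_contains (g : PySem.Dict String (PySem.Dict String Int)) (x : (String × String) × Int)
    (t1 t2 : String) (hc : g.contains t1 = true)
    (hi : (g.getD t1 PySem.Dict.empty).contains t2 = true) :
    ((pvStepB g x).getD t1 PySem.Dict.empty).contains t2 = true := by
  rw [pvStepB_eq]
  by_cases h : t1 = x.1.1
  · subst h
    rw [PySem.Dict.getD_insert_self]
    simp [PySem.Dict.contains_insert, hi]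
  · rw [PySem.Dict.getD_insert_of_ne _ _ _ h]
    exact hi

-- two pvStepB steps at distinct pairs commute, provided the first pair is already present
theorem pvStepB_comm (g : PySem.Dict String (PySem.Dict String Int)) (p : String × String)
    (q : (String × String) × Int) (v : Int) (hne : q.1 ≠ p)
    (hc : g.contains p.1 = true) (hi : (g.getD p.1 PySem.Dict.empty).contains p.2 = true) :
    pvStepB (pvStepB g (p, v)) q = pvStepB (pvStepB g q) (p, v) := by
  rw [pvStepB_eq g, pvStepB_eq g, pvStepB_eq, pvStepB_eq]
  by_cases hat : q.1.1 = p.1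
  · -- same outer key, different inner key
    have hbt : q.1.2 ≠ p.2 := by
      intro h2; exact hne (Prod.ext hat h2)
    rw [hat]
    rw [PySem.Dict.getD_insert_self, PySem.Dict.getD_insert_self,
      PySem.Dict.insert_insert_self, PySem.Dict.insert_insert_self]
    rw [pvInsert_comm _ _ _ _ _ (Ne.symm hbt) hi]
  · -- different outer keys
    rw [PySem.Dict.getD_insert_of_ne _ _ _ hat, PySem.Dict.getD_insert_of_ne _ _ _ (Ne.symm hat)]
    rw [pvInsert_comm _ _ _ _ _ (Ne.symm hat) hc]

-- a second pvStepB at the same pair overwrites the first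
theorem pvStepB_stepB (g : PySem.Dict String (PySem.Dict String Int)) (p : String × String) (v w : Int) :
    pvStepB (pvStepB g (p, v)) (p, w) = pvStepB g (p, w) := by
  rw [pvStepB_eq g, pvStepB_eq, pvStepB_eq]
  rw [PySem.Dict.getD_insert_self, PySem.Dict.insert_insert_self,
    PySem.Dict.insert_insert_self]

-- a step at a different pair does not change the (t1, t2) cell
theorem pvStepB_cell_ne (g : PySem.Dict String (PySem.Dict String Int)) (x : (String × String) × Int)
    (p : String × String) (hne : x.1 ≠ p) :
    ((pvStepB g x).getD p.1 PySem.Dict.empty).getD p.2 0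
      = (g.getD p.1 PySem.Dict.empty).getD p.2 0 := by
  rw [pvStepB_eq]
  by_cases h : p.1 = x.1.1
  · have hb : p.2 ≠ x.1.2 := by
      intro h2; exact hne (Prod.ext h.symm h2.symm)
    rw [h, PySem.Dict.getD_insert_self, PySem.Dict.getD_insert_of_ne _ _ _ hb]
  · rw [PySem.Dict.getD_insert_of_ne _ _ _ h]

theorem pvReshape_cons (x : (String × String) × Int) (l : List ((String × String) × Int))
    (g : PySem.Dict String (PySem.Dict String Int)) :
    pvReshape (x :: l) g = pvReshape l (pvStepB g x) := rfl

-- a pvStepB at a pair absent from l floats out of the reshaping fold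
theorem pvReshape_stepB_comm (p : String × String) (v : Int) :
    ∀ (l : List ((String × String) × Int)) (g : PySem.Dict String (PySem.Dict String Int)),
      p ∉ l.map Prod.fst → g.contains p.1 = true →
      (g.getD p.1 PySem.Dict.empty).contains p.2 = true →
      pvStepB (pvReshape l g) (p, v) = pvReshape l (pvStepB g (p, v)) := by
  intro l
  induction l with
  | nil => intro g _ _ _; rfl
  | cons x l ih =>
    intro g hnm hc hi
    simp only [List.map_cons, List.mem_cons, not_or] at hnm
    rw [pvReshape_cons, pvReshape_cons,
      ih (pvStepB g x) hnm.2 (pvStepB_contains g x p.1 hc)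
        (pvStepB_inner_contains g x p.1 p.2 hc hi),
      pvStepB_comm g p x v (fun h => hnm.1 h.symm) hc hi]

theorem pvReshape_cell_ne (p : String × String) :
    ∀ (l : List ((String × String) × Int)) (g : PySem.Dict String (PySem.Dict String Int)),
      p ∉ l.map Prod.fst →
      ((pvReshape l g).getD p.1 PySem.Dict.empty).getD p.2 0
        = (g.getD p.1 PySem.Dict.empty).getD p.2 0 := by
  intro l
  induction l with
  | nil => intro g _; rfl
  | cons x l ih =>
    intro g hnm
    simp only [List.map_cons, List.mem_cons, not_or] at hnm
    rw [pvReshape_cons, ih (pvStepB g x) hnm.2,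
      pvStepB_cell_ne g x p (fun h => hnm.1 h.symm)]

-- the reshaped graph's cells are the counter's entries
theorem pvReshape_cell (c : PySem.Dict (String × String) Int) (hnd : c.keys.Nodup) (p : String × String) :
    ((pvReshape c.items PySem.Dict.empty).getD p.1 PySem.Dict.empty).getD p.2 0 = c.getD p 0 := by
  by_cases hc : c.contains p
  · have hs : (c.get? p).isSome := by rw [← PySem.Dict.contains_eq_isSome_get?]; exact hc
    obtain ⟨v0, hv0⟩ := Option.isSome_iff_exists.mp hs
    obtain ⟨s, t, hst⟩ := List.append_of_mem (PySem.Dict.mem_items_of_get?_eq_some c hv0)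
    have hkeys : c.keys = c.items.map Prod.fst := rfl
    have hnd' : (c.items.map Prod.fst).Nodup := by rw [← hkeys]; exact hnd
    rw [hst] at hnd'
    simp only [List.map_append, List.map_cons, List.nodup_append, List.nodup_cons] at hnd'
    have hps : p ∉ t.map Prod.fst := hnd'.2.1.1
    rw [PySem.Dict.getD_of_get?_eq_some _ _ hv0, hst]
    show ((pvReshape (s ++ (p, v0) :: t) PySem.Dict.empty).getD p.1 PySem.Dict.empty).getD p.2 0 = v0
    rw [pvReshape, List.foldl_append, List.foldl_cons, ← pvReshape, ← pvReshape,
      pvReshape_cell_ne p t _ hps, pvStepB_eq, PySem.Dict.getD_insert_self,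
      PySem.Dict.getD_insert_self]
  · have hnm : p ∉ c.items.map Prod.fst := by
      intro hm
      have : p ∈ c.keys := hm
      rw [← PySem.Dict.contains_iff_mem_keys] at this
      exact hc this
    simp only [Bool.not_eq_true] at hc
    rw [pvReshape_cell_ne p c.items _ hnm, PySem.Dict.getD_of_not_contains _ _ hc]
    simp [PySem.Dict.getD_empty]

-- KEY LEMMA: counting one more pair then reshaping = reshaping then running A's step
theorem pvReshape_insert (c : PySem.Dict (String × String) Int) (hnd : c.keys.Nodup) (p : String × String) :
    pvReshape (c.insert p (c.getD p 0 + 1)).items PySem.Dict.empty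
      = pvStepA (pvReshape c.items PySem.Dict.empty) p := by
  rw [pvStepA_eq, pvReshape_cell c hnd p]
  by_cases hc : c.contains p
  · have hs : (c.get? p).isSome := by rw [← PySem.Dict.contains_eq_isSome_get?]; exact hc
    obtain ⟨v0, hv0⟩ := Option.isSome_iff_exists.mp hs
    have hgd : c.getD p 0 = v0 := PySem.Dict.getD_of_get?_eq_some _ _ hv0
    obtain ⟨s, t, hst⟩ := List.append_of_mem (PySem.Dict.mem_items_of_get?_eq_some c hv0)
    have hkeys : c.keys = c.items.map Prod.fst := rfl
    have hnd' : (c.items.map Prod.fst).Nodup := by rw [← hkeys]; exact hnd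
    rw [hst] at hnd'
    simp only [List.map_append, List.map_cons, List.nodup_append, List.nodup_cons] at hnd'
    have hpt : p ∉ t.map Prod.fst := hnd'.2.1.1
    have hps : p ∉ s.map Prod.fst := by
      intro hm
      exact hnd'.2.2 p hm p (by simp) rfl
    have hmap_s : List.map (fun q => if (q.1 == p) = true then (p, v0 + 1) else q) s = s := by
      rw [List.map_congr_left (g := id) ?_, List.map_id]
      intro q hq
      have hq1 : q.1 ≠ p := by
        intro h; exact hps (h ▸ List.mem_map_of_mem hq)
      simp [hq1]
    have hmap_t : List.map (fun q => if (q.1 == p) = true then (p, v0 + 1) else q) t = t := by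
      rw [List.map_congr_left (g := id) ?_, List.map_id]
      intro q hq
      have hq1 : q.1 ≠ p := by
        intro h; exact hpt (h ▸ List.mem_map_of_mem hq)
      simp [hq1]
    have hitems : (c.insert p (c.getD p 0 + 1)).items = s ++ (p, v0 + 1) :: t := by
      rw [PySem.Dict.items_insert_of_contains _ _ hc, hst, hgd]
      simp only [List.map_append, List.map_cons, beq_self_eq_true, if_true]
      rw [hmap_s, hmap_t]
    rw [hgd] at hitems ⊢
    rw [hitems, hst]
    simp only [pvReshape, List.foldl_append, List.foldl_cons]
    have hcont : (pvStepB (List.foldl pvStepB PySem.Dict.empty s) (p, v0)).contains p.1 = true := by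
      rw [pvStepB_eq]; exact PySem.Dict.contains_insert_self _ _ _
    have hinner : ((pvStepB (List.foldl pvStepB PySem.Dict.empty s) (p, v0)).getD p.1
        PySem.Dict.empty).contains p.2 = true := by
      rw [pvStepB_eq, PySem.Dict.getD_insert_self]
      exact PySem.Dict.contains_insert_self _ _ _
    have hcomm := pvReshape_stepB_comm p (v0 + 1) t
      (pvStepB (List.foldl pvStepB PySem.Dict.empty s) (p, v0)) hpt hcont hinner
    simp only [pvReshape] at hcomm
    rw [hcomm, pvStepB_stepB]
  · simp only [Bool.not_eq_true] at hc
    rw [PySem.Dict.items_insert_of_not_contains _ _ hc]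
    simp only [pvReshape, List.foldl_append, List.foldl_cons, List.foldl_nil]

theorem pvCnt_nodup (ps : List (String × String)) : (pvCnt ps).keys.Nodup :=
  PySem.Dict.nodup_keys_foldl_insert ps (fun d x => d.getD x 0 + 1) PySem.Dict.empty
    PySem.Dict.nodup_keys_empty

-- MAIN: reshape of the counter = A's one-pass fold
theorem pvMain (ps : List (String × String)) :
    pvReshape (pvCnt ps).items PySem.Dict.empty = ps.foldl pvStepA PySem.Dict.empty := by
  induction ps using List.reverseRecOn with
  | nil => rfl
  | append_singleton ps p ih =>
    have hcnt : pvCnt (ps ++ [p]) = (pvCnt ps).insert p ((pvCnt ps).getD p 0 + 1) := by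
      simp [pvCnt, List.foldl_append]
    rw [hcnt, List.foldl_append, List.foldl_cons, List.foldl_nil, ← ih,
      pvReshape_insert (pvCnt ps) (pvCnt_nodup ps) p]

-- fold over indices 0..len-2 with accesses at i, i+1 = fold over zip(xs, xs[1:])
theorem pvFoldl_range_adj {α γ : Type} (d : α) (f : γ → α → α → γ) :
    ∀ (xs : List α) (g : γ),
      (List.range (xs.length - 1)).foldl (fun g k => f g (xs.getD k d) (xs.getD (k + 1) d)) g
        = (xs.zip xs.tail).foldl (fun g e => f g e.1 e.2) g := by
  intro xs
  induction xs with
  | nil => intro g; simp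
  | cons x xs ih =>
    cases xs with
    | nil => intro g; simp
    | cons y t =>
      intro g
      have hlen : (x :: y :: t).length - 1 = t.length + 1 := by simp
      rw [hlen, List.range_succ_eq_map, List.foldl_cons, List.foldl_map]
      have hz : (x :: y :: t).zip (x :: y :: t).tail = (x, y) :: (y :: t).zip t := by simp
      rw [hz, List.foldl_cons]
      have hcg := PySem.List.foldl_congr_mem (List.range t.length)
        (fun x_1 y_1 => f x_1 ((x :: y :: t).getD y_1.succ d) ((x :: y :: t).getD (y_1.succ + 1) d))
        (fun g' k => f g' ((y :: t).getD k d) ((y :: t).getD (k + 1) d))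
        (f g ((x :: y :: t).getD 0 d) ((x :: y :: t).getD (0 + 1) d))
        (by intro g' k _; simp)
      rw [hcg]
      exact ih (f g x y)

theorem pvFoldl_pyRange_adj {α γ : Type} (d : α) (f : γ → α → α → γ) (xs : List α) (g : γ) :
    (PySem.List.pyRange 0 (PySem.List.len xs - 1) 1).foldl
        (fun g i => f g (PySem.List.pyGetD xs i d) (PySem.List.pyGetD xs (i + 1) d)) g
      = (xs.zip xs.tail).foldl (fun g e => f g e.1 e.2) g := by
  have hn : ((PySem.List.len xs - 1) - 0).toNat = xs.length - 1 := by
    simp only [PySem.List.len_eq]; omega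
  rw [PySem.List.pyRange_one, hn, List.foldl_map]
  rw [← pvFoldl_range_adj d f xs g]
  apply PySem.List.foldl_congr_mem
  intro acc k _
  have h2 : (k : Int) + 1 = ((k + 1 : Nat) : Int) := by push_cast; ring
  simp only [zero_add, h2, PySem.List.pyGetD_natCast]

theorem pvA_eq (log : List (String × List (List (String × String)))) :
    dependency_graph_inline log
      = ((pvPairs log).foldl pvStepA PySem.Dict.empty).items.map (fun q => (q.1, q.2.items)) := by
  have hfold : log.foldl (fun g p =>
      (PySem.List.pyRange 0 (PySem.List.len p.2 - 1) 1).foldl (fun g i =>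
        pvStepA g (pvLk (PySem.List.pyGetD p.2 i []), pvLk (PySem.List.pyGetD p.2 (i + 1) []))) g)
      PySem.Dict.empty = (pvPairs log).foldl pvStepA PySem.Dict.empty := by
    rw [pvPairs, List.foldl_flatMap]
    apply PySem.List.foldl_congr_mem
    intro g p _
    rw [List.foldl_map]
    exact pvFoldl_pyRange_adj ([] : List (String × String))
      (fun g e1 e2 => pvStepA g (pvLk e1, pvLk e2)) p.2 g
  exact congrArg (fun d : PySem.Dict String (PySem.Dict String Int) =>
    d.items.map (fun q => (q.1, q.2.items))) hfold

theorem pvB_eq (log : List (String × List (List (String × String)))) :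
    dependency_graph_inline_alt log
      = (pvReshape (pvCnt (pvPairs log)).items PySem.Dict.empty).items.map (fun q => (q.1, q.2.items)) := by
  have hcnt : log.foldl (fun counts p =>
      (p.2.zip (PySem.List.slice p.2 (some 1) none)).foldl (fun counts e =>
        counts.insert (pvLk e.1, pvLk e.2) (counts.getD (pvLk e.1, pvLk e.2) 0 + 1)) counts)
      PySem.Dict.empty = pvCnt (pvPairs log) := by
    rw [pvCnt, pvPairs, List.foldl_flatMap]
    apply PySem.List.foldl_congr_mem
    intro c p _
    rw [List.foldl_map, PySem.List.slice_from_one]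
  exact congrArg (fun c : PySem.Dict (String × String) Int =>
    (pvReshape c.items PySem.Dict.empty).items.map (fun q => (q.1, q.2.items))) hcnt

-- ===== VERDICT (by name: the statement is the Claim_ definition above) =====
theorem dependency_graph_inline_spec : Claim_equal_dependency_graph_inline := by
  intro log _ _
  unfold Spec_dependency_graph_inline
  rw [pvA_eq, pvB_eq, pvMain]
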